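-- pv_equiv track=rewrite | github.com/acaptainb/CSCI-141 | Lab/text_stats.py | printedWords
-- ===== SOURCE A (Python) =====
-- def printedWords(data):
--     a={}
--     for i in data:
--         for j in data[i]:
--             if j not in a:
--                 a[j] = 0
--             a[j]+=data[i][j]
--     naked = []
--     for y in a:
--         naked.append((y,a[y]))
--     return sorted(naked)
-- ===== SOURCE B (Python) =====
-- def printedWords(data):
--     flat = []
--     for inner in data.values():
--         flat.extend(inner.items())
--     flat.sort(key=lambda p: p[0])
--     out = []
--     for w, c in flat:
--         if out and out[-1][0] == w:
--             out[-1] = (w, out[-1][1] + c)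
--         else:
--             out.append((w, c))
--     return out
-- ===== Notes on version B (the rewrite author's own statement) =====
-- stated objective: alternative
-- what changed: Replaces A's dict-accumulation pass plus final sort of aggregated pairs by a flatten / stable-sort-by-word / single-pass run-collapsing (group-by) scan that never builds a dictionary.
import Mathlib
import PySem

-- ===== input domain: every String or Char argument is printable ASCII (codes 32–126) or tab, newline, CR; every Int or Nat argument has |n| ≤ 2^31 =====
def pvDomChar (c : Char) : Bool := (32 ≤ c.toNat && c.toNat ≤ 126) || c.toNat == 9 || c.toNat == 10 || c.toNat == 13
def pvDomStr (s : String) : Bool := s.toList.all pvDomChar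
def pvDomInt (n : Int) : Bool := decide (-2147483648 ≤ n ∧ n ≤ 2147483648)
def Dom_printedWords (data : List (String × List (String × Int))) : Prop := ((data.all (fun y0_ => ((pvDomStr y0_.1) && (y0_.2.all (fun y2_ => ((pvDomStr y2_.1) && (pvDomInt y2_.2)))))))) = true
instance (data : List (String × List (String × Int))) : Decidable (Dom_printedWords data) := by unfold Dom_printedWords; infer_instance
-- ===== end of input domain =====

-- B replaces A's dict-accumulation pass plus final sort of the aggregated pairs by a
-- flatten / stable-sort-by-word / single-pass run-collapsing scan (objective: alternative algorithm).

-- ===== PORT A =====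
-- body of A's inner 'for j in data[i]' loop: if j not in a: a[j] = 0; a[j] += data[i][j]
def pvStepA (a : PySem.Dict String Int) (j : String × Int) : PySem.Dict String Int :=
  let a' := if a.contains j.1 then a else a.insert j.1 0
  a'.insert j.1 (a'.getD j.1 0 + j.2)

def printedWords (data : List (String × List (String × Int))) : List (String × Int) :=
  let a : PySem.Dict String Int :=
    data.foldl (fun a i => i.2.foldl pvStepA a) PySem.Dict.empty
  let naked : List (String × Int) :=
    a.keys.foldl (fun naked y => naked ++ [(y, a.getD y 0)]) []
  PySem.List.sorted2 naked (fun p => p.1) (fun p => p.2)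

-- ===== PORT B =====
-- body of B's grouping loop: merge into out[-1] if the word repeats, else append
def pvGroupStep (out : List (String × Int)) (p : String × Int) : List (String × Int) :=
  match out.getLast? with
  | some q => if q.1 == p.1 then out.dropLast ++ [(p.1, q.2 + p.2)] else out ++ [p]
  | none => out ++ [p]

def printedWords_alt (data : List (String × List (String × Int))) : List (String × Int) :=
  let flat : List (String × Int) := data.foldl (fun acc i => acc ++ i.2) []
  let s := PySem.List.sorted flat (fun p => p.1)
  s.foldl pvGroupStep []

-- ===== PRECONDITION & SPEC =====
def Spec_printedWords (data : List (String × List (String × Int))) (out : List (String × Int)) : Prop := out = printedWords_alt data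
instance (data : List (String × List (String × Int))) (out : List (String × Int)) : Decidable (Spec_printedWords data out) := by unfold Spec_printedWords; infer_instance

-- ===== CLAIM (what is proved, stated in full; the proofs are below) =====
def Claim_equal_printedWords : Prop := ∀ (data : List (String × List (String × Int))), Dom_printedWords data → Spec_printedWords data (printedWords data)

-- ===== LEMMAS AND PROOFS =====

-- the total count of word w in a list of (word, count) entries
def pvS (l : List (String × Int)) (w : String) : Int :=
  ((l.filter (fun p => p.1 == w)).map (fun p => p.2)).sum

theorem pvS_cons (p : String × Int) (t : List (String × Int)) (w : String) :
    pvS (p :: t) w = if p.1 = w then p.2 + pvS t w else pvS t w := by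
  simp [pvS, List.filter_cons]
  split <;> simp_all

theorem pvS_perm {l₁ l₂ : List (String × Int)} (h : l₁.Perm l₂) (w : String) :
    pvS l₁ w = pvS l₂ w :=
  List.Perm.sum_eq ((h.filter _).map _)

theorem pvS_eq_zero {l : List (String × Int)} {w : String} (h : ∀ p ∈ l, p.1 ≠ w) :
    pvS l w = 0 := by
  have hf : l.filter (fun p => p.1 == w) = [] := by
    rw [List.filter_eq_nil_iff]
    intro a ha
    simpa using h a ha
  simp [pvS, hf]

-- A's loop body is Dict.modify
theorem pvStepA_eq_modify (a : PySem.Dict String Int) (j : String × Int) :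
    pvStepA a j = a.modify j.1 0 (· + j.2) := by
  unfold pvStepA PySem.Dict.modify
  by_cases h : a.contains j.1
  · simp [h]
  · simp only [h, Bool.false_eq_true, if_false]
    rw [PySem.Dict.getD_insert_self, PySem.Dict.insert_insert_self,
        PySem.Dict.getD_of_not_contains a 0 (by simpa using h)]

-- getD of the aggregation fold
theorem pv_getD_fold (l : List (String × Int)) (d : PySem.Dict String Int) (w : String) :
    (l.foldl (fun d p => d.modify p.1 0 (· + p.2)) d).getD w 0 = d.getD w 0 + pvS l w := by
  induction l generalizing d with
  | nil => simp [pvS]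
  | cons p t ih =>
    rw [List.foldl_cons, ih, PySem.Dict.getD_modify, pvS_cons]
    by_cases h : w = p.1 <;> simp [h, eq_comm] <;> ring

-- the grouped output never shrinks back to []
theorem pvGroupStep_ne_nil (out : List (String × Int)) (p : String × Int) :
    pvGroupStep out p ≠ [] := by
  unfold pvGroupStep
  cases h : out.getLast? <;> simp
  split <;> simp

-- elements strictly before the last are never touched by the grouping fold
theorem pv_fold_group_append (s : List (String × Int)) (acc₀ m : List (String × Int)) (hm : m ≠ []) :
    s.foldl pvGroupStep (acc₀ ++ m) = acc₀ ++ s.foldl pvGroupStep m := by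
  induction s generalizing m with
  | nil => rfl
  | cons p t ih =>
    have h1 : pvGroupStep (acc₀ ++ m) p = acc₀ ++ pvGroupStep m p := by
      cases hL : m.getLast? with
      | none => exact absurd (List.getLast?_eq_none_iff.mp hL) hm
      | some q =>
        have hA : (acc₀ ++ m).getLast? = some q := by rw [List.getLast?_append, hL]; rfl
        simp only [pvGroupStep, hA, hL]
        split
        · simp [hm, List.append_assoc]
        · rw [List.append_assoc]
    rw [List.foldl_cons, List.foldl_cons, h1, ih _ (pvGroupStep_ne_nil m p)]

-- running the grouping fold from a single open run (w, c)
theorem pv_fold_group_run (t : List (String × Int)) (ht : t.Pairwise (fun a b => a.1 ≤ b.1))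
    (w : String) (c : Int) (hw : ∀ p ∈ t, w ≤ p.1) :
    t.foldl pvGroupStep [(w, c)] =
      (w, c + pvS t w) :: (t.filter (fun p => !(p.1 == w))).foldl pvGroupStep [] := by
  induction t generalizing c with
  | nil => simp [pvS]
  | cons p t ih =>
    rw [List.pairwise_cons] at ht
    obtain ⟨hp, ht'⟩ := ht
    by_cases h : p.1 = w
    · have hstep : pvGroupStep [(w, c)] p = [(w, c + p.2)] := by
        simp [pvGroupStep, h]
      rw [List.foldl_cons, hstep, ih ht' (c + p.2) (fun q hq => hw q (List.mem_cons_of_mem p hq))]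
      rw [pvS_cons]
      simp [h, add_assoc]
    · have hlt : w < p.1 := lt_of_le_of_ne (hw p List.mem_cons_self) (fun e => h e.symm)
      have hne : ∀ q ∈ t, q.1 ≠ w := fun q hq e => absurd (lt_of_lt_of_le hlt (hp q hq)) (by rw [e]; exact lt_irrefl w)
      have hwp : ¬ w = p.1 := fun e => h e.symm
      have hstep : pvGroupStep [(w, c)] p = [(w, c)] ++ [p] := by
        simp [pvGroupStep, hwp]
      rw [List.foldl_cons, hstep, pv_fold_group_append t [(w, c)] [p] (by simp)]
      have hfilter : (p :: t).filter (fun q => !(q.1 == w)) = p :: t := by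
        rw [List.filter_eq_self]
        intro q hq
        rcases List.mem_cons.mp hq with hq | hq
        · subst hq; simpa using h
        · simpa using hne q hq
      have hS : pvS (p :: t) w = 0 := pvS_eq_zero (by
        intro q hq
        rcases List.mem_cons.mp hq with e | hq
        · subst e; exact h
        · exact hne q hq)
      rw [hfilter, hS, add_zero]
      have : (p :: t).foldl pvGroupStep [] = t.foldl pvGroupStep [p] := by
        simp [List.foldl_cons, pvGroupStep]
      rw [this]
      rfl

-- Set.ofList commutes with filter
theorem pv_ofList_filter (l : List String) (p : String → Bool) :
    PySem.Set.ofList (l.filter p) = (PySem.Set.ofList l).filter p := by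
  induction l using List.reverseRecOn with
  | nil => rfl
  | append_singleton l x ih =>
    rw [List.filter_append, PySem.Set.ofList_append_singleton]
    cases hpx : p x with
    | false =>
      simp only [List.filter_cons, hpx, List.filter_nil, List.append_nil, Bool.false_eq_true, if_false]
      rw [ih, PySem.Set.add]
      split
      · rfl
      · rw [List.filter_append]
        simp [hpx]
    | true =>
      simp only [List.filter_cons, hpx, List.filter_nil, if_true]
      rw [PySem.Set.ofList_append_singleton, ih, PySem.Set.add, PySem.Set.add]
      by_cases hmem : x ∈ PySem.Set.ofList l
      · have h1 : (PySem.Set.ofList l).contains x = true := by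
          simpa [PySem.Set.contains] using hmem
        have h2 : ((PySem.Set.ofList l).filter p).contains x = true := by
          simp only [PySem.Set.contains, List.contains_eq_mem, decide_eq_true_eq]
          exact List.mem_filter.mpr ⟨hmem, hpx⟩
        have hml : x ∈ l := (PySem.Set.mem_ofList l x).mp hmem
        simp [h1, h2, hml, hpx]
      · have h1 : (PySem.Set.ofList l).contains x = false := by
          simpa [PySem.Set.contains] using hmem
        have h2 : ((PySem.Set.ofList l).filter p).contains x = false := by
          simp only [PySem.Set.contains, List.contains_eq_mem, decide_eq_false_iff_not]
          exact fun hx => hmem (List.mem_filter.mp hx).1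
        have hml : x ∉ l := fun hx => hmem ((PySem.Set.mem_ofList l x).mpr hx)
        simp [h1, h2, hml, hpx, List.filter_append]

theorem pv_ofList_sublist (l : List String) : List.Sublist (PySem.Set.ofList l) l := by
  induction l using List.reverseRecOn with
  | nil => simp
  | append_singleton l x ih =>
    rw [PySem.Set.ofList_append_singleton, PySem.Set.add]
    split
    · exact ih.trans (List.sublist_append_left l [x])
    · exact List.Sublist.append ih (List.Sublist.refl [x])

-- closed form of the grouping fold on a list sorted by word
theorem pv_fold_group (n : Nat) (s : List (String × Int)) (hn : s.length ≤ n)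
    (hs : s.Pairwise (fun a b => a.1 ≤ b.1)) :
    s.foldl pvGroupStep [] =
      (PySem.Set.ofList (s.map (fun p => p.1))).map (fun w => (w, pvS s w)) := by
  induction n generalizing s with
  | zero =>
    have : s = [] := List.length_eq_zero_iff.mp (Nat.le_zero.mp hn)
    subst this; rfl
  | succ n ih =>
    cases s with
    | nil => rfl
    | cons p t =>
      obtain ⟨w0, c⟩ := p
      rw [List.pairwise_cons] at hs
      obtain ⟨hp, ht⟩ := hs
      have hstep0 : pvGroupStep [] (w0, c) = [(w0, c)] := by simp [pvGroupStep]
      rw [List.foldl_cons, hstep0, pv_fold_group_run t ht w0 c (fun q hq => hp q hq)]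
      set t₂ := t.filter (fun p => !(p.1 == w0)) with ht₂
      have hlen : t₂.length ≤ n := le_trans (List.length_filter_le _ _) (Nat.succ_le_succ_iff.mp hn)
      rw [ih t₂ hlen (List.Pairwise.sublist List.filter_sublist ht)]
      have hmapfst : (((w0, c) :: t).map (fun p => p.1)) = w0 :: t.map (fun p => p.1) := rfl
      rw [hmapfst, PySem.Set.ofList_cons]
      have hdis : (PySem.Set.ofList (t.map (fun p => p.1))).discard w0 = PySem.Set.ofList (t₂.map (fun p => p.1)) := by
        rw [PySem.Set.discard, ← pv_ofList_filter]
        congr 1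
        rw [ht₂, List.filter_map]
        rfl
      rw [List.map_cons, hdis]
      have hhead : (w0, c + pvS t w0) = (w0, pvS ((w0, c) :: t) w0) := by
        rw [pvS_cons]; simp
      have htail : (PySem.Set.ofList (t₂.map (fun p => p.1))).map (fun w => (w, pvS t₂ w)) =
          (PySem.Set.ofList (t₂.map (fun p => p.1))).map (fun w => (w, pvS ((w0, c) :: t) w)) := by
        apply List.map_congr_left
        intro w hw
        have hw' : w ∈ t₂.map (fun p => p.1) := (PySem.Set.mem_ofList _ _).mp hw
        have hwne : w ≠ w0 := by
          obtain ⟨q, hq, rfl⟩ := List.mem_map.mp hw'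
          have := (List.mem_filter.mp hq).2
          simpa using this
        have hne : ¬ w0 = w := fun e => hwne e.symm
        have h1 : pvS ((w0, c) :: t) w = pvS t w := by
          rw [pvS_cons, if_neg hne]
        have h2 : pvS t₂ w = pvS t w := by
          rw [ht₂]
          unfold pvS
          rw [List.filter_filter]
          have hf : (t.filter (fun a => a.1 == w && !(a.1 == w0))) = t.filter (fun p => p.1 == w) := by
            apply List.filter_congr
            intro q _
            cases hq : (q.1 == w) with
            | false => simp [hq]
            | true =>
              have : q.1 = w := by simpa using hq
              simp [hq, this, hwne]
          rw [hf]
        rw [h2, h1]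
      rw [hhead, htail]

-- insertBy only depends on the comparator's values on the compared elements
theorem pv_insertBy_congr (b₁ b₂ : (String × Int) → (String × Int) → Bool) (x : String × Int)
    (ys : List (String × Int)) (h : ∀ y ∈ ys, b₁ x y = b₂ x y) :
    PySem.List.insertBy b₁ x ys = PySem.List.insertBy b₂ x ys := by
  induction ys with
  | nil => simp [PySem.List.insertBy]
  | cons y ys ih =>
    have e1 : PySem.List.insertBy b₁ x (y :: ys) =
        if b₁ x y then x :: y :: ys else y :: PySem.List.insertBy b₁ x ys := by
      simp [PySem.List.insertBy]
    have e2 : PySem.List.insertBy b₂ x (y :: ys) =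
        if b₂ x y then x :: y :: ys else y :: PySem.List.insertBy b₂ x ys := by
      simp [PySem.List.insertBy]
    rw [e1, e2, h y List.mem_cons_self, ih (fun z hz => h z (List.mem_cons_of_mem y hz))]

theorem pv_foldl_insertBy_congr (b₁ b₂ : (String × Int) → (String × Int) → Bool)
    (xs : List (String × Int)) (acc : List (String × Int))
    (h : ∀ x ∈ xs, ∀ y, (y ∈ acc ∨ y ∈ xs) → b₁ x y = b₂ x y) :
    xs.foldl (fun acc x => PySem.List.insertBy b₁ x acc) acc =
      xs.foldl (fun acc x => PySem.List.insertBy b₂ x acc) acc := by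
  induction xs generalizing acc with
  | nil => rfl
  | cons x xs ih =>
    rw [List.foldl_cons, List.foldl_cons]
    rw [pv_insertBy_congr b₁ b₂ x acc
      (fun y hy => h x List.mem_cons_self y (Or.inl hy))]
    apply ih
    intro z hz y hy
    rcases hy with hy | hy
    · rcases (PySem.List.insertBy_mem_iff b₂ x y acc).mp hy with heq | hy
      · exact h z (List.mem_cons_of_mem x hz) y (Or.inr (by rw [heq]; exact List.mem_cons_self))
      · exact h z (List.mem_cons_of_mem x hz) y (Or.inl hy)
    · exact h z (List.mem_cons_of_mem x hz) y (Or.inr (List.mem_cons_of_mem x hy))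

-- on a list with pairwise-distinct words, Python's tuple sort is a sort by the word alone
theorem pv_sorted2_eq_sorted (xs : List (String × Int)) (hnd : (xs.map (fun p => p.1)).Nodup) :
    PySem.List.sorted2 xs (fun p => p.1) (fun p => p.2) = PySem.List.sorted xs (fun p => p.1) := by
  unfold PySem.List.sorted2 PySem.List.sorted
  simp only [if_neg (by simp : ¬ (false = true))]
  apply pv_foldl_insertBy_congr
  intro x hx y hy
  have hy : y ∈ xs := by
    rcases hy with hy | hy
    · cases hy
    · exact hy
  by_cases h1 : x.1 < y.1
  · simp [h1]
  · by_cases h2 : y.1 < x.1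
    · simp [h1, h2]
    · have hxy : x.1 = y.1 := le_antisymm (not_lt.mp h2) (not_lt.mp h1)
      have hxey : x = y := List.inj_on_of_nodup_map hnd hx hy hxy
      subst hxey
      simp [h1]

-- A and B agree everywhere
theorem pv_main (data : List (String × List (String × Int))) :
    printedWords data = printedWords_alt data := by
  have hflat : data.foldl (fun acc i => acc ++ i.2) [] = data.flatMap (fun i => i.2) := by
    simpa using PySem.List.foldl_append_eq_flatMap (fun i => i.2) data []
  set flat := data.flatMap (fun i => i.2) with hflatdef
  have hA1 : data.foldl (fun a i => i.2.foldl pvStepA a) PySem.Dict.empty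
      = flat.foldl (fun d p => d.modify p.1 0 (· + p.2)) PySem.Dict.empty := by
    rw [List.foldl_flatMap]
    have hst : pvStepA = fun (d : PySem.Dict String Int) (p : String × Int) => d.modify p.1 0 (· + p.2) :=
      funext fun a => funext fun j => pvStepA_eq_modify a j
    rw [hst]
  set a : PySem.Dict String Int := flat.foldl (fun d p => d.modify p.1 0 (· + p.2)) PySem.Dict.empty with ha
  have hkeys : a.keys = PySem.Set.ofList (flat.map (fun p => p.1)) := by
    rw [ha]
    have h := PySem.Dict.keys_foldl_modify_key flat (fun p => p.1) (0 : Int)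
      (fun _ p => (· + p.2)) PySem.Dict.empty
    simpa [PySem.Dict.keys_empty] using h
  have hgetD : ∀ w, a.getD w 0 = pvS flat w := by
    intro w
    rw [ha, pv_getD_fold]
    simp [PySem.Dict.getD_empty]
  have hnaked : a.keys.foldl (fun naked y => naked ++ [(y, a.getD y 0)]) [] =
      (PySem.Set.ofList (flat.map (fun p => p.1))).map (fun w => (w, pvS flat w)) := by
    rw [PySem.List.foldl_append_singleton_eq_map (fun y => (y, a.getD y 0)) a.keys []]
    simp only [List.nil_append]
    rw [hkeys]
    exact List.map_congr_left (fun w _ => by rw [hgetD])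
  set W := PySem.Set.ofList (flat.map (fun p => p.1)) with hW
  set naked := W.map (fun w => (w, pvS flat w)) with hnk
  have hnd : (naked.map (fun p => p.1)).Nodup := by
    have : naked.map (fun p => p.1) = W := by
      rw [hnk, List.map_map]
      exact List.map_id W
    rw [this, hW]
    exact PySem.Set.nodup_ofList _
  set s := PySem.List.sorted flat (fun p => p.1) with hsdef
  have hsp : s.Perm flat := PySem.List.sorted_perm flat (fun p => p.1) false
  have hspair : s.Pairwise (fun p q => p.1 ≤ q.1) := PySem.List.sorted_pairwise flat (fun p => p.1)
  have hB : s.foldl pvGroupStep [] =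
      (PySem.Set.ofList (s.map (fun p => p.1))).map (fun w => (w, pvS flat w)) := by
    rw [pv_fold_group s.length s le_rfl hspair]
    exact List.map_congr_left (fun w _ => by rw [pvS_perm hsp])
  set M := PySem.Set.ofList (s.map (fun p => p.1)) with hM
  have hMW : M.Perm W := by
    rw [hM, hW]
    refine (List.perm_ext_iff_of_nodup (PySem.Set.nodup_ofList _) (PySem.Set.nodup_ofList _)).mpr ?_
    intro w
    rw [PySem.Set.mem_ofList, PySem.Set.mem_ofList]
    exact (hsp.map (fun p => p.1)).mem_iff
  have hMlt : M.Pairwise (· < ·) := by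
    have hle : M.Pairwise (· ≤ ·) :=
      List.Pairwise.sublist (pv_ofList_sublist _) (PySem.List.sorted_map_key_pairwise flat (fun p => p.1))
    have hne : M.Pairwise (· ≠ ·) := PySem.Set.nodup_ofList _
    exact (hle.and hne).imp (fun h => lt_of_le_of_ne h.1 h.2)
  have hBlt : ((PySem.Set.ofList (s.map (fun p => p.1))).map (fun w => (w, pvS flat w))).Pairwise
      (fun p q => p.1 < q.1) := by
    rw [List.pairwise_map]
    exact hMlt
  have hBperm : ((PySem.Set.ofList (s.map (fun p => p.1))).map (fun w => (w, pvS flat w))).Perm naked := by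
    rw [hnk]
    exact hMW.map _
  unfold printedWords printedWords_alt
  show PySem.List.sorted2
      ((data.foldl (fun a i => i.2.foldl pvStepA a) PySem.Dict.empty).keys.foldl
        (fun naked y => naked ++ [(y, (data.foldl (fun a i => i.2.foldl pvStepA a) PySem.Dict.empty).getD y 0)]) [])
      (fun p => p.1) (fun p => p.2)
    = (PySem.List.sorted (data.foldl (fun acc i => acc ++ i.2) []) (fun p => p.1)).foldl pvGroupStep []
  rw [hflat, hA1, hnaked, pv_sorted2_eq_sorted naked hnd, ← hsdef, hB]
  exact PySem.List.sorted_eq_of_perm_of_pairwise_lt naked _ (fun p => p.1) hBperm hBlt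

-- ===== VERDICT (by name: the statement is the Claim_ definition above) =====
theorem printedWords_spec : Claim_equal_printedWords := by
  intro data _
  unfold Spec_printedWords
  exact pv_main data
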